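-- pv_equiv track=rewrite | github.com/Karabiy/amis_python | km72/Ponoyko_Vladislav/Task4_10.py | count
-- ===== SOURCE A (Python) =====
-- def count(x,y):
--     n=0;
--     if(x<y):
--         while(x<y):
--             x+=1
--             n+=1
--     else:
--         while(x>y):
--             x+=-1
--             n+=1
--     return(n)
-- ===== SOURCE B (Python) =====
-- def count(x, y):
--     return abs(x - y)
-- ===== Notes on version B (the rewrite author's own statement) =====
-- stated objective: faster
-- what changed: Replaced the step-by-step increment/decrement loop counting unit moves with the closed form abs(x-y).
import Mathlib
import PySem

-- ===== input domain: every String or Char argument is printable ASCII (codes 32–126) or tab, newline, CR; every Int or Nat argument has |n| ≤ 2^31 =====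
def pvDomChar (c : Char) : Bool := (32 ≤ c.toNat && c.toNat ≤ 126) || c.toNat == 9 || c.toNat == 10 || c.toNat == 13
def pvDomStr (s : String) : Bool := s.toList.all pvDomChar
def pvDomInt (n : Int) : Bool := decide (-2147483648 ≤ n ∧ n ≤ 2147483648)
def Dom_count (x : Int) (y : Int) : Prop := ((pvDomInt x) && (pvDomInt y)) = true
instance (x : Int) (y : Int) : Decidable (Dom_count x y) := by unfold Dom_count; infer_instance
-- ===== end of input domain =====

-- B replaces A's one-step-at-a-time counting loop with the closed form |x - y| (O(1) vs O(|x-y|)).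


-- ===== PORT A =====
-- 'while x < y: x += 1; n += 1' — structural recursion on the gap (y - x).toNat
def countUp (x y n : Int) : Int :=
  if x < y then countUp (x + 1) y (n + 1) else n
termination_by (y - x).toNat
decreasing_by
  have : y - (x + 1) < y - x := by omega
  omega

-- 'while x > y: x += -1; n += 1'
def countDown (x y n : Int) : Int :=
  if x > y then countDown (x + -1) y (n + 1) else n
termination_by (x - y).toNat
decreasing_by omega

def count (x : Int) (y : Int) : Int :=
  if x < y then countUp x y 0 else countDown x y 0

-- ===== PORT B =====
def count_alt (x : Int) (y : Int) : Int := |x - y|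

-- ===== PRECONDITION & SPEC =====
def Spec_count (x : Int) (y : Int) (out : Int) : Prop := out = count_alt x y
instance (x : Int) (y : Int) (out : Int) : Decidable (Spec_count x y out) := by unfold Spec_count; infer_instance

-- ===== CLAIM (what is proved, stated in full; the proofs are below) =====
def Claim_equal_count : Prop := ∀ (x : Int) (y : Int), Dom_count x y → Spec_count x y (count x y)

-- ===== LEMMAS AND PROOFS =====
theorem countUp_eq (x y n : Int) : countUp x y n = if x < y then n + (y - x) else n := by
  rw [countUp]
  split
  · rw [countUp_eq (x + 1) y (n + 1)]
    split <;> omega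
  · rfl
termination_by (y - x).toNat
decreasing_by omega

theorem countDown_eq (x y n : Int) : countDown x y n = if x > y then n + (x - y) else n := by
  rw [countDown]
  split
  · rw [countDown_eq (x + -1) y (n + 1)]
    split <;> omega
  · rfl
termination_by (x - y).toNat
decreasing_by omega

-- ===== VERDICT (by name: the statement is the Claim_ definition above) =====
theorem count_spec : Claim_equal_count := by
  intro x y _
  unfold Spec_count count count_alt
  rw [countUp_eq, countDown_eq] at *
  rcases abs_cases (x - y) with ⟨h1, h2⟩ | ⟨h1, h2⟩ <;> rw [h1] <;> split_ifs <;> omega
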